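-- pv_equiv track=rewrite | github.com/Biols0208/Telomere_analyzer | telomere_analyzer.py | create_flexible_pattern
-- ===== SOURCE A (Python) =====
-- def create_flexible_pattern(sequence: str, flexibility: str = "medium") -> str:
--     """Create flexible regex pattern from sequence"""
--     if flexibility == "strict":
--         return sequence
--     elif flexibility == "medium":
--         # Allow slight variations in repeat counts
--         pattern = ""
--         i = 0
--         while i < len(sequence):
--             base = sequence[i]
--             # Count consecutive identical bases
--             count = 1
--             while i + count < len(sequence) and sequence[i + count] == base:
--                 count += 1
--
--             if count == 1:
--                 pattern += base
--             elif count == 2: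
--                 pattern += f"{base}{{1,3}}"
--             else:
--                 pattern += f"{base}{{{max(1, count-1)},{count+1}}}"
--
--             i += count
--         return pattern
--     elif flexibility == "loose":
--         # More flexible pattern
--         pattern = ""
--         for base in sequence:
--             if base in 'AT':
--                 pattern += "[AT]{1,3}"
--             elif base in 'GC':
--                 pattern += "[GC]{1,3}"
--             else:
--                 pattern += f"{base}{{1,2}}"
--         return pattern
--     else:
--         raise ValueError("Flexibility must be 'strict', 'medium', or 'loose'")
-- ===== SOURCE B (Python) =====
-- _LOOSE = {'A': "[AT]{1,3}", 'T': "[AT]{1,3}", 'G': "[GC]{1,3}", 'C': "[GC]{1,3}"}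
--
--
-- def _piece(base, count):
--     if count == 1:
--         return base
--     if count == 2:
--         return f"{base}{{1,3}}"
--     return f"{base}{{{max(1, count-1)},{count+1}}}"
--
--
-- def create_flexible_pattern(sequence: str, flexibility: str = "medium") -> str:
--     """Create flexible regex pattern from sequence"""
--     if flexibility == "strict":
--         return sequence
--     if flexibility == "medium":
--         # no run counting: collect boundary indices, pair them up with zip
--         n = len(sequence)
--         starts = [i for i in range(n) if i == 0 or sequence[i] != sequence[i - 1]]
--         ends = starts[1:] + [n]
--         return "".join(_piece(sequence[i], j - i) for i, j in zip(starts, ends))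
--     if flexibility == "loose":
--         return "".join(_LOOSE.get(b, f"{b}{{1,2}}") for b in sequence)
--     raise ValueError("Flexibility must be 'strict', 'medium', or 'loose'")
-- ===== Notes on version B (the rewrite author's own statement) =====
-- stated objective: alternative
-- what changed: Medium mode no longer counts runs at all: it collects the boundary indices where the character differs from its predecessor in one comprehension, pairs consecutive boundaries with zip, and maps each (start,end) pair to its piece; loose mode becomes a dict table lookup instead of a branch chain.
import Mathlib
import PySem

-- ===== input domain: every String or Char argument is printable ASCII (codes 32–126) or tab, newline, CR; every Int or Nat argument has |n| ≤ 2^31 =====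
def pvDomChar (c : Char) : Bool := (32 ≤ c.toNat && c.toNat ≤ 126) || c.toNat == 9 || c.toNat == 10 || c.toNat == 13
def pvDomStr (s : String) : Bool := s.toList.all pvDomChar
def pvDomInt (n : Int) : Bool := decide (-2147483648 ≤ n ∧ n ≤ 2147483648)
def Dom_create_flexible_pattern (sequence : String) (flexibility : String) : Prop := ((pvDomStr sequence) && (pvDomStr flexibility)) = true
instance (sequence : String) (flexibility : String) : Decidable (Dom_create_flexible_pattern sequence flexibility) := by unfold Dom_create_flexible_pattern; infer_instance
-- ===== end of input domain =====

-- B replaces A's medium-mode run counting (nested while-loops) by a staged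
-- boundary-index computation: the comprehension collects the indices where the
-- character differs from its predecessor, zip pairs consecutive boundaries, and
-- each pair is mapped to a piece; loose mode is a dict table lookup instead of a
-- branch chain. Objective: alternative. Equivalence is on the three valid
-- flexibility values (elsewhere both raise ValueError).

-- ===== PORT A =====

-- inner while-loop: count of consecutive chars equal to base at the head of l
def pvCountRunA (base : Char) (l : List Char) : Nat :=
  match l with
  | [] => 0
  | c :: rest => if c == base then 1 + pvCountRunA base rest else 0

-- outer while-loop of the "medium" branch
def pvMediumA (l : List Char) : String :=
  match l with
  | [] => ""
  | base :: rest =>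
    let count := 1 + pvCountRunA base rest
    let piece :=
      if count = 1 then String.ofList [base]
      else if count = 2 then String.ofList [base] ++ "{1,3}"
      else String.ofList [base] ++ "{" ++ toString (max 1 (count - 1)) ++ "," ++ toString (count + 1) ++ "}"
    piece ++ pvMediumA (rest.drop (pvCountRunA base rest))
termination_by l.length
decreasing_by simp only [List.length_drop, List.length_cons]; omega

-- one character of the "loose" branch
def pvLooseCharA (base : Char) : String :=
  if base == 'A' || base == 'T' then "[AT]{1,3}"
  else if base == 'G' || base == 'C' then "[GC]{1,3}"
  else String.ofList [base] ++ "{1,2}"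

def create_flexible_pattern (sequence : String) (flexibility : String) : String :=
  if flexibility = "strict" then sequence
  else if flexibility = "medium" then pvMediumA sequence.toList
  else if flexibility = "loose" then
    sequence.toList.foldl (fun pattern base => pattern ++ pvLooseCharA base) ""
  else ""  -- Python raises ValueError here; excluded by Pre_

-- ===== PORT B =====

-- Source B's _piece
def pvPieceB (base : Char) (count : Nat) : String :=
  if count = 1 then String.ofList [base]
  else if count = 2 then String.ofList [base] ++ "{1,3}"
  else String.ofList [base] ++ "{" ++ toString (max 1 (count - 1)) ++ "," ++ toString (count + 1) ++ "}"

-- the comprehension's condition: i == 0 or sequence[i] != sequence[i-1]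
-- (both indices are in range whenever the condition's second disjunct is reached)
def pvIsStart (l : List Char) (i : Nat) : Bool :=
  i == 0 || !(l.getD i ' ' == l.getD (i - 1) ' ')

-- starts = [i for i in range(n) if i == 0 or sequence[i] != sequence[i-1]]
def pvStarts (l : List Char) : List Nat :=
  (List.range l.length).filter (pvIsStart l)

-- Source B's module-level _LOOSE dict literal
def pvLooseDict : PySem.Dict Char String :=
  PySem.Dict.ofList [('A', "[AT]{1,3}"), ('T', "[AT]{1,3}"), ('G', "[GC]{1,3}"), ('C', "[GC]{1,3}")]

def create_flexible_pattern_alt (sequence : String) (flexibility : String) : String :=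
  if flexibility = "strict" then sequence
  else if flexibility = "medium" then
    let l := sequence.toList
    let starts := pvStarts l
    let ends := starts.drop 1 ++ [l.length]
    String.join ((starts.zip ends).map (fun ij => pvPieceB (l.getD ij.1 ' ') (ij.2 - ij.1)))
  else if flexibility = "loose" then
    String.join (sequence.toList.map (fun b => pvLooseDict.getD b (String.ofList [b] ++ "{1,2}")))
  else ""  -- Python raises ValueError here; excluded by Pre_

-- ===== PRECONDITION & SPEC =====
-- Pre_ excludes exactly the inputs on which A raises ValueError (any flexibility
-- other than the three accepted keywords); B raises the same ValueError there.
def Pre_create_flexible_pattern (sequence : String) (flexibility : String) : Prop :=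
  flexibility = "strict" ∨ flexibility = "medium" ∨ flexibility = "loose"
instance (sequence : String) (flexibility : String) : Decidable (Pre_create_flexible_pattern sequence flexibility) := by unfold Pre_create_flexible_pattern; infer_instance

def pvWitness_create_flexible_pattern : String × String := ("AATTTGX", "medium")

def Spec_create_flexible_pattern (sequence : String) (flexibility : String) (out : String) : Prop := out = create_flexible_pattern_alt sequence flexibility
instance (sequence : String) (flexibility : String) (out : String) : Decidable (Spec_create_flexible_pattern sequence flexibility out) := by unfold Spec_create_flexible_pattern; infer_instance

-- ===== CLAIM (what is proved, stated in full; the proofs are below) =====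
def Claim_equal_create_flexible_pattern : Prop := ∀ (sequence : String) (flexibility : String), Dom_create_flexible_pattern sequence flexibility → Pre_create_flexible_pattern sequence flexibility → Spec_create_flexible_pattern sequence flexibility (create_flexible_pattern sequence flexibility)

-- ===== LEMMAS AND PROOFS =====

theorem pvJoin_foldl (l : List String) : ∀ s : String, l.foldl (· ++ ·) s = s ++ String.join l := by
  induction l with
  | nil => intro s; simp [String.join]
  | cons x xs ih =>
    intro s
    simp only [String.join, List.foldl_cons]
    rw [ih, ih ("" ++ x)]
    simp [String.append_assoc]

theorem pvJoin_cons (x : String) (l : List String) : String.join (x :: l) = x ++ String.join l := by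
  show List.foldl (· ++ ·) "" (x :: l) = _
  simp only [List.foldl_cons]
  rw [pvJoin_foldl]
  simp

-- canonical run decomposition both medium branches are reduced to
def pvRuns (l : List Char) : List (Char × Nat) :=
  match l with
  | [] => []
  | b :: rest =>
    (b, 1 + (rest.takeWhile (· == b)).length) :: pvRuns (rest.dropWhile (· == b))
termination_by l.length
decreasing_by
  have := List.length_dropWhile_le (p := (· == b)) (l := rest)
  simp only [List.length_cons]; omega

theorem pvDrop_takeWhile (b : Char) (rest : List Char) :
    List.drop (List.takeWhile (fun x => x == b) rest).length rest
      = List.dropWhile (fun x => x == b) rest := by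
  induction rest with
  | nil => rfl
  | cons c tl ih =>
    by_cases h : c == b
    · simp [h, ih]
    · simp [h]

theorem pvCountRunA_eq (b : Char) (l : List Char) :
    pvCountRunA b l = (l.takeWhile (· == b)).length := by
  induction l with
  | nil => rfl
  | cons c rest ih =>
    simp only [pvCountRunA, List.takeWhile]
    by_cases h : c == b <;> simp [h, ih] <;> omega

theorem pvMediumA_eq_runs (l : List Char) :
    pvMediumA l = String.join ((pvRuns l).map fun r => pvPieceB r.1 r.2) := by
  induction l using pvRuns.induct with
  | case1 => simp [pvMediumA, pvRuns, String.join]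
  | case2 b rest ih =>
    rw [pvMediumA, pvRuns]
    simp only [List.map_cons]
    rw [pvJoin_cons, pvCountRunA_eq]
    rw [pvDrop_takeWhile, ih]
    simp [pvPieceB]

-- ---- B side: boundary indices of a run-decomposed list ----

-- the pieces B's medium branch joins
def pvPiecesB (l : List Char) : List String :=
  ((pvStarts l).zip ((pvStarts l).drop 1 ++ [l.length])).map
    (fun ij => pvPieceB (l.getD ij.1 ' ') (ij.2 - ij.1))

theorem pvFilter_range_run (k : Nat) (p : Nat → Bool) (h0 : p 0 = true)
    (hk : 1 ≤ k) (h : ∀ i, 1 ≤ i → i < k → p i = false) :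
    (List.range k).filter p = [0] := by
  induction k with
  | zero => omega
  | succ n ih =>
    rcases Nat.eq_or_lt_of_le hk with h1 | h1
    · simp [← h1, h0]
    · rw [List.range_succ, List.filter_append]
      rw [ih (by omega) (fun i hi1 hi2 => h i hi1 (by omega))]
      have : p n = false := h n (by omega) (by omega)
      simp [this]

theorem pvGetD_run (k : Nat) (b : Char) (d : List Char) (i : Nat) (hi : i < k) :
    (List.replicate k b ++ d).getD i ' ' = b := by
  rw [List.getD_append _ _ _ _ (by simpa using hi)]
  simp [List.getD, hi]

theorem pvGetD_tail (k : Nat) (b : Char) (d : List Char) (i : Nat) :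
    (List.replicate k b ++ d).getD (k + i) ' ' = d.getD i ' ' := by
  rw [List.getD_append_right _ _ _ _ (by simp)]
  simp

theorem pvIsStart_run (k : Nat) (b : Char) (d : List Char) (i : Nat)
    (hi : i < k) (h1 : 1 ≤ i) : pvIsStart (List.replicate k b ++ d) i = false := by
  unfold pvIsStart
  rw [pvGetD_run k b d i hi, pvGetD_run k b d (i - 1) (by omega)]
  simp; omega

theorem pvIsStart_tail (k : Nat) (b : Char) (d : List Char) (i : Nat)
    (hk : 1 ≤ k) (hi : i < d.length)
    (hd : ∀ c, d.head? = some c → (c == b) = false) :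
    pvIsStart (List.replicate k b ++ d) (k + i) = pvIsStart d i := by
  rcases Nat.eq_zero_or_pos i with h0 | h0
  · subst h0
    obtain ⟨c, d', rfl⟩ : ∃ c d', d = c :: d' := by
      cases d with
      | nil => simp at hi
      | cons c d' => exact ⟨c, d', rfl⟩
    have hc : (c == b) = false := hd c rfl
    have hk0 : (k == 0) = false := by simp; omega
    have hgk : (List.replicate k b ++ c :: d').getD k ' ' = c := by
      have := pvGetD_tail k b (c :: d') 0
      simpa using this
    have hgk1 : (List.replicate k b ++ c :: d').getD (k - 1) ' ' = b :=
      pvGetD_run k b _ (k - 1) (by omega)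
    unfold pvIsStart
    simp only [Nat.add_zero]
    rw [hgk, hgk1, hk0]
    simp [hc]
  · unfold pvIsStart
    have h1 : k + i - 1 = k + (i - 1) := by omega
    rw [pvGetD_tail k b d i, h1, pvGetD_tail k b d (i - 1)]
    have h2 : (k + i == 0) = false := by simp; omega
    have h3 : (i == 0) = false := by simp; omega
    rw [h2, h3]

theorem pvStarts_decomp (k : Nat) (b : Char) (d : List Char) (hk : 1 ≤ k)
    (hd : ∀ c, d.head? = some c → (c == b) = false) :
    pvStarts (List.replicate k b ++ d) = 0 :: (pvStarts d).map (k + ·) := by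
  unfold pvStarts
  have hl : (List.replicate k b ++ d).length = k + d.length := by simp
  rw [hl, List.range_add, List.filter_append]
  rw [pvFilter_range_run k _ (by simp [pvIsStart]) hk
    (fun i h1 h2 => pvIsStart_run k b d i h2 h1)]
  rw [List.filter_map]
  have : ∀ i ∈ List.range d.length,
      (pvIsStart (List.replicate k b ++ d) ∘ (k + ·)) i = pvIsStart d i := by
    intro i hi
    simp only [Function.comp]
    exact pvIsStart_tail k b d i hk (List.mem_range.mp hi) hd
  rw [List.filter_congr this]
  rfl

theorem pvStarts_head (d : List Char) (hd : d ≠ []) :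
    ∃ S', pvStarts d = 0 :: S' := by
  obtain ⟨m, hm⟩ : ∃ m, d.length = m + 1 := by
    cases d with
    | nil => simp at hd
    | cons c d' => exact ⟨d'.length, by simp⟩
  refine ⟨((List.range m).map Nat.succ).filter (pvIsStart d), ?_⟩
  unfold pvStarts
  rw [hm, List.range_succ_eq_map, List.filter_cons]
  simp [pvIsStart]

theorem pvPiecesB_decomp (k : Nat) (b : Char) (d : List Char) (hk : 1 ≤ k)
    (hd : ∀ c, d.head? = some c → (c == b) = false) :
    pvPiecesB (List.replicate k b ++ d) = pvPieceB b k :: pvPiecesB d := by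
  unfold pvPiecesB
  rw [pvStarts_decomp k b d hk hd]
  have hl : (List.replicate k b ++ d).length = k + d.length := by simp
  rcases eq_or_ne d ([] : List Char) with rfl | hdne
  · -- d = []: starts = [0], one pair (0, k)
    have h0 : pvStarts ([] : List Char) = [] := rfl
    have hlen : (List.replicate k b ++ ([] : List Char)).length = k := by simp
    rw [h0, hlen]
    simp only [List.map_nil, List.drop_succ_cons, List.drop_nil, List.nil_append,
      List.zip_cons_cons, List.zip_nil_right, List.map_cons, List.map_nil]
    rw [pvGetD_run k b [] 0 (by omega)]
    simp only [List.zip_nil_left, List.map_nil, Nat.sub_zero]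
  · -- d ≠ []
    obtain ⟨S', hS⟩ := pvStarts_head d hdne
    rw [hS, hl]
    simp only [List.map_cons, List.drop_succ_cons, List.drop_zero]
    -- starts l = 0 :: k :: S'.map (k+·); ends l = k :: (S'.map (k+·) ++ [k + d.length])
    have hmap : ∀ (L : List Nat) (e : Nat),
        ((k :: L.map (k + ·)).zip (L.map (k + ·) ++ [k + e])) =
          ((0 :: L).zip (L ++ [e])).map (fun p => (k + p.1, k + p.2)) := by
      intro L e
      have h1 : k :: L.map (k + ·) = (0 :: L).map (k + ·) := by simp
      have h2 : L.map (k + ·) ++ [k + e] = (L ++ [e]).map (k + ·) := by simp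
      rw [h1, h2, List.zip_map]
      rfl
    simp only [Nat.add_zero]
    rw [show ∀ (A : List Nat) (e : Nat), ((0 :: k :: A).zip (k :: A ++ [e])) = (0, k) :: ((k :: A).zip (A ++ [e])) from fun A e => rfl]
    rw [List.map_cons]
    congr 1
    · rw [pvGetD_run k b d 0 (by omega)]; simp
    · rw [hmap S' d.length, List.map_map]
      congr 1
      funext p
      simp only [Function.comp]
      rw [pvGetD_tail k b d p.1]
      congr 1
      omega

theorem pvPiecesB_eq_runs (l : List Char) :
    pvPiecesB l = (pvRuns l).map fun r => pvPieceB r.1 r.2 := by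
  induction l using pvRuns.induct with
  | case1 => simp [pvPiecesB, pvStarts, pvRuns]
  | case2 b rest ih =>
    have ht : rest.takeWhile (· == b) = List.replicate (rest.takeWhile (· == b)).length b :=
      List.eq_replicate_of_mem (fun x hx => by
        have := List.mem_takeWhile_imp hx
        simpa using this)
    have hdecomp : b :: rest =
        List.replicate (1 + (rest.takeWhile (· == b)).length) b ++ rest.dropWhile (· == b) := by
      rw [Nat.add_comm, List.replicate_succ, List.cons_append, ← ht,
        List.takeWhile_append_dropWhile]
    have hd : ∀ c, (rest.dropWhile (· == b)).head? = some c → (c == b) = false := by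
      intro c hc
      have := List.head?_dropWhile_not (· == b) rest
      rw [hc] at this
      exact this
    rw [pvRuns, List.map_cons, hdecomp,
      pvPiecesB_decomp _ b _ (by omega) hd, ih]

theorem pvAltMedium (l : List Char) :
    String.join (((pvStarts l).zip ((pvStarts l).drop 1 ++ [l.length])).map
      (fun ij => pvPieceB (l.getD ij.1 ' ') (ij.2 - ij.1))) = pvMediumA l := by
  rw [pvMediumA_eq_runs, ← pvPiecesB_eq_runs]
  rfl

theorem pvLooseChar_eq (b : Char) :
    pvLooseCharA b = pvLooseDict.getD b (String.ofList [b] ++ "{1,2}") := by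
  by_cases hA : b = 'A'; · subst hA; rfl
  by_cases hT : b = 'T'; · subst hT; rfl
  by_cases hG : b = 'G'; · subst hG; rfl
  by_cases hC : b = 'C'; · subst hC; rfl
  have h1 : ('A' == b) = false := by simp [Ne.symm hA]
  have h2 : ('T' == b) = false := by simp [Ne.symm hT]
  have h3 : ('G' == b) = false := by simp [Ne.symm hG]
  have h4 : ('C' == b) = false := by simp [Ne.symm hC]
  have hb1 : (b == 'A') = false := by simp [hA]
  have hb2 : (b == 'T') = false := by simp [hT]
  have hb3 : (b == 'G') = false := by simp [hG]
  have hb4 : (b == 'C') = false := by simp [hC]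
  unfold pvLooseCharA
  rw [hb1, hb2, hb3, hb4]
  simp only [Bool.or_self, Bool.false_eq_true, if_false]
  simp [pvLooseDict, PySem.Dict.ofList, PySem.Dict.getD, PySem.Dict.get?, PySem.Dict.empty,
    PySem.Dict.update, PySem.Dict.insert, PySem.Dict.contains, h1, h2, h3, h4]

theorem pvLoose_eq (l : List Char) (s : String) :
    l.foldl (fun pattern base => pattern ++ pvLooseCharA base) s =
      s ++ String.join (l.map (fun b => pvLooseDict.getD b (String.ofList [b] ++ "{1,2}"))) := by
  induction l generalizing s with
  | nil => simp [String.join]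
  | cons x xs ih =>
    simp only [List.foldl_cons, List.map_cons]
    rw [ih, pvJoin_cons, ← pvLooseChar_eq]
    simp [String.append_assoc]

-- ===== VERDICT (by name: the statement is the Claim_ definition above) =====
theorem create_flexible_pattern_spec : Claim_equal_create_flexible_pattern := by
  intro sequence flexibility _ hpre
  unfold Spec_create_flexible_pattern
  rcases hpre with h | h | h <;> subst h
  · rfl
  · have h1 : create_flexible_pattern sequence "medium" = pvMediumA sequence.toList := rfl
    have h2 : create_flexible_pattern_alt sequence "medium" =
        String.join (((pvStarts sequence.toList).zip
            ((pvStarts sequence.toList).drop 1 ++ [sequence.toList.length])).map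
          (fun ij => pvPieceB (sequence.toList.getD ij.1 ' ') (ij.2 - ij.1))) := rfl
    rw [h1, h2, pvAltMedium]
  · have h1 : create_flexible_pattern sequence "loose" =
        sequence.toList.foldl (fun pattern base => pattern ++ pvLooseCharA base) "" := rfl
    have h2 : create_flexible_pattern_alt sequence "loose" =
        String.join (sequence.toList.map
          (fun b => pvLooseDict.getD b (String.ofList [b] ++ "{1,2}"))) := rfl
    rw [h1, h2, pvLoose_eq]
    simp
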